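-- pv_equiv track=rewrite | github.com/merijnkok959595/app.screentimejourney | aws_lambda_api/milestone_notifications.py | get_milestone_for_days
-- ===== SOURCE A (Python) =====
-- from typing import Dict, Any, List, Optional, Tuple
--
-- def get_milestone_for_days(milestones: List[Dict], days: int, gender: str) -> Optional[Dict]:
--     """Find the milestone that corresponds to the given number of days"""
--     gender_milestones = [m for m in milestones if m.get('gene', m.get('gender', '')).lower() == gender.lower()]
--     sorted_milestones = sorted(gender_milestones, key=lambda m: int(m.get('milestone_day', m.get('days_required', 0))))
--
--     current = None
--     for milestone in sorted_milestones:
--         required_days = int(milestone.get('milestone_day', milestone.get('days_required', 0)))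
--         if days >= required_days:
--             current = milestone
--         else:
--             break
--
--     return current
-- ===== SOURCE B (Python) =====
-- from typing import Dict, Any, List, Optional, Tuple
--
-- def get_milestone_for_days(milestones: List[Dict], days: int, gender: str) -> Optional[Dict]:
--     """Find the milestone that corresponds to the given number of days (single linear pass)."""
--     g = gender.lower()
--     best = None
--     best_req = None
--     for m in milestones:
--         if m.get('gene', m.get('gender', '')).lower() != g:
--             continue
--         required = int(m.get('milestone_day', m.get('days_required', 0)))
--         if required <= days and (best_req is None or best_req <= required):
--             best = m
--             best_req = required
--     return best
-- ===== Notes on version B (the rewrite author's own statement) =====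
-- stated objective: faster
-- what changed: Replaced filter + stable sort + scan-with-break by a single linear pass that keeps the best (max required_days <= days, later-on-tie) milestone.
import Mathlib
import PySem

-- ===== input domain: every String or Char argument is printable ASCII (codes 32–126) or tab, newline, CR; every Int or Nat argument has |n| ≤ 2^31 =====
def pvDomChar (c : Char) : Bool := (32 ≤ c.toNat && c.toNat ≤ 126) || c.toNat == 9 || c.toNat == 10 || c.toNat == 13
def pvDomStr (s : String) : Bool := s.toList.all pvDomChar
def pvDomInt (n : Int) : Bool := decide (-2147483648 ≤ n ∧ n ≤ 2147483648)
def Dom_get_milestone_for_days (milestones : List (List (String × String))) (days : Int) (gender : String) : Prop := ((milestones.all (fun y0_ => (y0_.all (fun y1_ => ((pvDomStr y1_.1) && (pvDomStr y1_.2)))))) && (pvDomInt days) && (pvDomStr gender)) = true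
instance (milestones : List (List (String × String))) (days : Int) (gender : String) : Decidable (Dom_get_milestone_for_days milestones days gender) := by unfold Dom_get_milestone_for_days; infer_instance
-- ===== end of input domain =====

-- B replaces A's filter + stable sort + scan-with-break by one linear pass keeping the
-- best (max required_days ≤ days, later-on-tie) milestone; return value only, no mutation.

-- shared helpers (direct transliterations of the Python dict.get / int() expressions)
-- m.get('gene', m.get('gender', ''))
def pvGenderOf (m : List (String × String)) : String :=
  match m.lookup "gene" with
  | some s => s
  | none => match m.lookup "gender" with
            | some s => s
            | none => ""

-- int(m.get('milestone_day', m.get('days_required', 0))); none = ValueError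
def pvReq? (m : List (String × String)) : Option Int :=
  match m.lookup "milestone_day" with
  | some s => PySem.Int.ofStr? s
  | none => match m.lookup "days_required" with
            | some s => PySem.Int.ofStr? s
            | none => some 0

def pvReq (m : List (String × String)) : Int := (pvReq? m).getD 0

-- ===== PORT A =====
-- the for-loop with break, current as accumulator
def pvLoopA (days : Int) : List (List (String × String)) → Option (List (String × String)) → Option (List (String × String))
  | [], current => current
  | m :: rest, current =>
      if days ≥ pvReq m then pvLoopA days rest (some m) else current

def get_milestone_for_days (milestones : List (List (String × String))) (days : Int) (gender : String) : Option (List (String × String)) :=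
  let gender_milestones := milestones.filter (fun m => PySem.Str.lower (pvGenderOf m) == PySem.Str.lower gender)
  let sorted_milestones := PySem.List.sorted gender_milestones pvReq
  pvLoopA days sorted_milestones none

-- ===== PORT B =====
-- body of B's loop after the gender 'continue': update best/best_req
def pvStepB (days : Int) (s : Option (List (String × String) × Int)) (m : List (String × String)) : Option (List (String × String) × Int) :=
  if pvReq m ≤ days then
    match s with
    | none => some (m, pvReq m)
    | some (_, best_req) => if best_req ≤ pvReq m then some (m, pvReq m) else s
  else s

def get_milestone_for_days_alt (milestones : List (List (String × String))) (days : Int) (gender : String) : Option (List (String × String)) :=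
  let g := PySem.Str.lower gender
  (milestones.foldl (fun s m => if PySem.Str.lower (pvGenderOf m) ≠ g then s else pvStepB days s m) none).map (·.1)

-- ===== PRECONDITION & SPEC =====
-- Pre_ excludes exactly the inputs where int() raises ValueError: a gender-matching
-- milestone whose day field does not parse as a Python int.
def Pre_get_milestone_for_days (milestones : List (List (String × String))) (days : Int) (gender : String) : Prop :=
  ∀ m ∈ milestones, (PySem.Str.lower (pvGenderOf m) == PySem.Str.lower gender) = true → (pvReq? m).isSome = true
instance (milestones : List (List (String × String))) (days : Int) (gender : String) : Decidable (Pre_get_milestone_for_days milestones days gender) := by unfold Pre_get_milestone_for_days; infer_instance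

def pvWitness_get_milestone_for_days : (List (List (String × String))) × Int × String :=
  ([[("gene", "m"), ("milestone_day", "5")], [("gender", "M"), ("days_required", "30")]], 7, "M")

def Spec_get_milestone_for_days (milestones : List (List (String × String))) (days : Int) (gender : String) (out : Option (List (String × String))) : Prop := out = get_milestone_for_days_alt milestones days gender
instance (milestones : List (List (String × String))) (days : Int) (gender : String) (out : Option (List (String × String))) : Decidable (Spec_get_milestone_for_days milestones days gender out) := by unfold Spec_get_milestone_for_days; infer_instance

-- ===== CLAIM (what is proved, stated in full; the proofs are below) =====
def Claim_equal_get_milestone_for_days : Prop := ∀ (milestones : List (List (String × String))) (days : Int) (gender : String), Dom_get_milestone_for_days milestones days gender → Pre_get_milestone_for_days milestones days gender → Spec_get_milestone_for_days milestones days gender (get_milestone_for_days milestones days gender)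

-- ===== LEMMAS AND PROOFS =====

-- A-side scan written as a left fold (the step applied at each element)
def pvSA (days : Int) (s : Option (List (String × String))) (m : List (String × String)) : Option (List (String × String)) :=
  if pvReq m ≤ days then some m else s

-- a run of ineligible elements leaves the A-fold state unchanged
theorem pvSA_noop (days : Int) (t : List (List (String × String)))
    (h : ∀ y ∈ t, ¬ pvReq y ≤ days) (c : Option (List (String × String))) :
    t.foldl (pvSA days) c = c := by
  induction t generalizing c with
  | nil => rfl
  | cons y t ih =>
      simp only [List.foldl_cons, pvSA, if_neg (h y (by simp))]
      exact ih (fun z hz => h z (by simp [hz])) c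

-- on a key-sorted list the break-loop equals the full left fold
theorem loopA_eq_foldl (days : Int) (ys : List (List (String × String)))
    (hs : ys.Pairwise (fun a b => pvReq a ≤ pvReq b)) (c : Option (List (String × String))) :
    pvLoopA days ys c = ys.foldl (pvSA days) c := by
  induction ys generalizing c with
  | nil => rfl
  | cons m t ih =>
      rcases List.pairwise_cons.mp hs with ⟨hm, ht⟩
      by_cases h : pvReq m ≤ days
      · simp only [pvLoopA, if_pos (by omega : days ≥ pvReq m), List.foldl_cons, pvSA]
        exact ih ht (some m)
      · simp only [pvLoopA, if_neg (by omega : ¬ days ≥ pvReq m), List.foldl_cons, pvSA]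
        exact (pvSA_noop days t (fun y hy => by have := hm y hy; omega) c).symm

-- effect of one stable insertion on the A-fold over a sorted list
theorem foldl_insertBy (days : Int) (x : List (String × String)) (S : List (List (String × String)))
    (hs : S.Pairwise (fun a b => pvReq a ≤ pvReq b)) (c : Option (List (String × String))) :
    (PySem.List.insertBy (fun a b => decide (pvReq a < pvReq b)) x S).foldl (pvSA days) c
      = if pvReq x ≤ days ∧ (∀ y ∈ S, pvReq y ≤ days → pvReq y ≤ pvReq x) then some x
        else S.foldl (pvSA days) c := by
  induction S generalizing c with
  | nil =>
      simp only [PySem.List.insertBy, List.foldl_cons, List.foldl_nil]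
      by_cases hex : pvReq x ≤ days
      · simp [pvSA, hex]
      · simp [pvSA, hex]
  | cons y t ih =>
      rcases List.pairwise_cons.mp hs with ⟨hy, ht⟩
      simp only [PySem.List.insertBy]
      by_cases hlt : pvReq x < pvReq y
      · have hb : (decide (pvReq x < pvReq y)) = true := by simpa using hlt
        rw [if_pos hb]
        by_cases hey : pvReq y ≤ days
        · have hcond : ¬ (pvReq x ≤ days ∧ ∀ z ∈ y :: t, pvReq z ≤ days → pvReq z ≤ pvReq x) := by
            rintro ⟨-, hall⟩
            have := hall y (by simp) hey
            omega
          rw [if_neg hcond]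
          simp only [List.foldl_cons]
          rw [show pvSA days (pvSA days c x) y = pvSA days c y from by simp [pvSA, hey]]
        · have htin : ∀ z ∈ t, ¬ pvReq z ≤ days := fun z hz => by have := hy z hz; omega
          by_cases hex : pvReq x ≤ days
          · have hcond : pvReq x ≤ days ∧ ∀ z ∈ y :: t, pvReq z ≤ days → pvReq z ≤ pvReq x := by
              refine ⟨hex, ?_⟩
              intro z hz hze
              rcases List.mem_cons.mp hz with rfl | hz
              · exact absurd hze hey
              · exact absurd hze (htin z hz)
            rw [if_pos hcond]
            simp only [List.foldl_cons]
            rw [show pvSA days c x = some x from by simp [pvSA, hex],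
              show pvSA days (some x) y = some x from by simp [pvSA, hey]]
            exact pvSA_noop days t htin (some x)
          · have hcond : ¬ (pvReq x ≤ days ∧ ∀ z ∈ y :: t, pvReq z ≤ days → pvReq z ≤ pvReq x) :=
              fun h => hex h.1
            rw [if_neg hcond]
            simp only [List.foldl_cons]
            rw [show pvSA days c x = c from by simp [pvSA, hex]]
      · have hb : ¬ ((decide (pvReq x < pvReq y)) = true) := by simpa using hlt
        rw [if_neg hb]
        have hyx : pvReq y ≤ pvReq x := by omega
        simp only [List.foldl_cons]
        rw [ih ht (pvSA days c y)]
        have hiff : (pvReq x ≤ days ∧ ∀ z ∈ t, pvReq z ≤ days → pvReq z ≤ pvReq x)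
            ↔ (pvReq x ≤ days ∧ ∀ z ∈ y :: t, pvReq z ≤ days → pvReq z ≤ pvReq x) := by
          constructor
          · rintro ⟨h1, h2⟩
            refine ⟨h1, ?_⟩
            intro z hz hze
            rcases List.mem_cons.mp hz with rfl | hz
            · exact hyx
            · exact h2 z hz hze
          · rintro ⟨h1, h2⟩
            exact ⟨h1, fun z hz hze => h2 z (by simp [hz]) hze⟩
        rw [if_congr hiff rfl rfl]

-- invariant of B's fold: the state is a latest maximal eligible element of the prefix
theorem stepB_inv (days : Int) (l : List (List (String × String))) :
    (l.foldl (pvStepB days) none = none → ∀ y ∈ l, ¬ pvReq y ≤ days) ∧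
    (∀ b r, l.foldl (pvStepB days) none = some (b, r) →
      b ∈ l ∧ r = pvReq b ∧ r ≤ days ∧ ∀ y ∈ l, pvReq y ≤ days → pvReq y ≤ r) := by
  induction l using List.reverseRecOn with
  | nil =>
      constructor
      · intro _ y hy
        exact absurd hy List.not_mem_nil
      · intro b r h
        simp at h
  | append_singleton l x ih =>
      rcases ih with ⟨hnone, hsome⟩
      rw [List.foldl_append, List.foldl_cons, List.foldl_nil]
      rcases hst : l.foldl (pvStepB days) none with _ | ⟨b0, r0⟩
      · by_cases hex : pvReq x ≤ days
        · rw [show pvStepB days none x = some (x, pvReq x) from by simp [pvStepB, hex]]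
          constructor
          · intro h
            simp at h
          · intro b r h
            simp only [Option.some.injEq, Prod.mk.injEq] at h
            obtain ⟨rfl, rfl⟩ := h
            refine ⟨by simp, rfl, hex, ?_⟩
            intro y hy hye
            rcases List.mem_append.mp hy with hy | hy
            · exact absurd hye (hnone hst y hy)
            · simp at hy; subst hy; omega
        · rw [show pvStepB days none x = none from by simp [pvStepB, hex]]
          constructor
          · intro _ y hy
            rcases List.mem_append.mp hy with hy | hy
            · exact hnone hst y hy
            · simp at hy; subst hy; exact hex
          · intro b r h
            simp at h
      · obtain ⟨hb0, hr0, hr0d, hmax⟩ := hsome b0 r0 hst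
        by_cases hex : pvReq x ≤ days
        · by_cases hbr : r0 ≤ pvReq x
          · rw [show pvStepB days (some (b0, r0)) x = some (x, pvReq x) from by
              simp [pvStepB, hex, hbr]]
            constructor
            · intro h
              simp at h
            · intro b r h
              simp only [Option.some.injEq, Prod.mk.injEq] at h
              obtain ⟨rfl, rfl⟩ := h
              refine ⟨by simp, rfl, hex, ?_⟩
              intro y hy hye
              rcases List.mem_append.mp hy with hy | hy
              · have := hmax y hy hye; omega
              · simp at hy; subst hy; omega
          · rw [show pvStepB days (some (b0, r0)) x = some (b0, r0) from by
              simp [pvStepB, hex, hbr]]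
            constructor
            · intro h
              simp at h
            · intro b r h
              simp only [Option.some.injEq, Prod.mk.injEq] at h
              obtain ⟨rfl, rfl⟩ := h
              refine ⟨List.mem_append.mpr (Or.inl hb0), hr0, hr0d, ?_⟩
              intro y hy hye
              rcases List.mem_append.mp hy with hy | hy
              · exact hmax y hy hye
              · simp at hy; subst hy; omega
        · rw [show pvStepB days (some (b0, r0)) x = some (b0, r0) from by simp [pvStepB, hex]]
          constructor
          · intro h
            simp at h
          · intro b r h
            simp only [Option.some.injEq, Prod.mk.injEq] at h
            obtain ⟨rfl, rfl⟩ := h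
            refine ⟨List.mem_append.mpr (Or.inl hb0), hr0, hr0d, ?_⟩
            intro y hy hye
            rcases List.mem_append.mp hy with hy | hy
            · exact hmax y hy hye
            · simp at hy; subst hy; omega

-- main bridge: A's sort-then-scan over a list equals B's single pass over it
theorem main_bridge (days : Int) (l : List (List (String × String))) :
    pvLoopA days (PySem.List.sorted l pvReq) none
      = (l.foldl (pvStepB days) none).map (·.1) := by
  induction l using List.reverseRecOn with
  | nil => rfl
  | append_singleton l x ih =>
      have hins : PySem.List.sorted (l ++ [x]) pvReq
          = PySem.List.insertBy (fun a b => decide (pvReq a < pvReq b)) x (PySem.List.sorted l pvReq) := by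
        rw [PySem.List.sorted_eq_foldl_insertBy, PySem.List.sorted_eq_foldl_insertBy, List.foldl_append,
          List.foldl_cons, List.foldl_nil]
      have hpw : (PySem.List.sorted l pvReq).Pairwise (fun a b => pvReq a ≤ pvReq b) :=
        PySem.List.sorted_pairwise l pvReq
      have hpw2 : (PySem.List.sorted (l ++ [x]) pvReq).Pairwise (fun a b => pvReq a ≤ pvReq b) :=
        PySem.List.sorted_pairwise (l ++ [x]) pvReq
      rw [hins] at hpw2
      rw [hins, loopA_eq_foldl days _ hpw2 none, foldl_insertBy days x _ hpw none,
        ← loopA_eq_foldl days _ hpw none, ih, List.foldl_append, List.foldl_cons, List.foldl_nil]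
      obtain ⟨hnone, hsome⟩ := stepB_inv days l
      rcases hst : l.foldl (pvStepB days) none with _ | ⟨b0, r0⟩
      · by_cases hex : pvReq x ≤ days
        · have hcond : pvReq x ≤ days ∧ ∀ y ∈ PySem.List.sorted l pvReq, pvReq y ≤ days → pvReq y ≤ pvReq x := by
            refine ⟨hex, fun y hy hye => ?_⟩
            exact absurd hye (hnone hst y ((PySem.List.mem_sorted l pvReq false y).mp hy))
          rw [if_pos hcond, show pvStepB days none x = some (x, pvReq x) from by simp [pvStepB, hex]]
          rfl
        · have hcond : ¬ (pvReq x ≤ days ∧ ∀ y ∈ PySem.List.sorted l pvReq, pvReq y ≤ days → pvReq y ≤ pvReq x) :=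
            fun h => hex h.1
          rw [if_neg hcond, show pvStepB days none x = none from by simp [pvStepB, hex]]
      · obtain ⟨hb0, hr0, hr0d, hmax⟩ := hsome b0 r0 hst
        by_cases hex : pvReq x ≤ days
        · by_cases hbr : r0 ≤ pvReq x
          · have hcond : pvReq x ≤ days ∧ ∀ y ∈ PySem.List.sorted l pvReq, pvReq y ≤ days → pvReq y ≤ pvReq x := by
              refine ⟨hex, fun y hy hye => ?_⟩
              have := hmax y ((PySem.List.mem_sorted l pvReq false y).mp hy) hye
              omega
            rw [if_pos hcond, show pvStepB days (some (b0, r0)) x = some (x, pvReq x) from by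
              simp [pvStepB, hex, hbr]]
            rfl
          · have hcond : ¬ (pvReq x ≤ days ∧ ∀ y ∈ PySem.List.sorted l pvReq, pvReq y ≤ days → pvReq y ≤ pvReq x) := by
              rintro ⟨-, hall⟩
              have := hall b0 ((PySem.List.mem_sorted l pvReq false b0).mpr hb0) (by omega)
              omega
            rw [if_neg hcond, show pvStepB days (some (b0, r0)) x = some (b0, r0) from by
              simp [pvStepB, hex, hbr]]
        · have hcond : ¬ (pvReq x ≤ days ∧ ∀ y ∈ PySem.List.sorted l pvReq, pvReq y ≤ days → pvReq y ≤ pvReq x) :=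
            fun h => hex h.1
          rw [if_neg hcond, show pvStepB days (some (b0, r0)) x = some (b0, r0) from by
            simp [pvStepB, hex]]

-- ===== VERDICT (by name: the statement is the Claim_ definition above) =====
theorem get_milestone_for_days_spec : Claim_equal_get_milestone_for_days := by
  intro milestones days gender _ _
  unfold Spec_get_milestone_for_days
  show (let gender_milestones := milestones.filter (fun m => PySem.Str.lower (pvGenderOf m) == PySem.Str.lower gender);
        let sorted_milestones := PySem.List.sorted gender_milestones pvReq;
        pvLoopA days sorted_milestones none)
      = (let g := PySem.Str.lower gender;
         (milestones.foldl (fun s m => if PySem.Str.lower (pvGenderOf m) ≠ g then s else pvStepB days s m) none).map (·.1))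
  show pvLoopA days (PySem.List.sorted (milestones.filter (fun m => PySem.Str.lower (pvGenderOf m) == PySem.Str.lower gender)) pvReq) none
      = (milestones.foldl (fun s m => if PySem.Str.lower (pvGenderOf m) ≠ PySem.Str.lower gender then s else pvStepB days s m) none).map (·.1)
  have hbody : (fun (s : Option (List (String × String) × Int)) m =>
        if PySem.Str.lower (pvGenderOf m) ≠ PySem.Str.lower gender then s else pvStepB days s m)
      = (fun s m => if (PySem.Str.lower (pvGenderOf m) == PySem.Str.lower gender) = true then pvStepB days s m else s) := by
    funext s m
    by_cases h : PySem.Str.lower (pvGenderOf m) = PySem.Str.lower gender <;> simp [h]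
  rw [hbody, ← List.foldl_filter]
  exact main_bridge days (milestones.filter (fun m => PySem.Str.lower (pvGenderOf m) == PySem.Str.lower gender))
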